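-- pv_equiv track=rewrite | github.com/Fondamenti18/fondamenti-di-programmazione | students/1815399/homework01/program02.py | centinaia
-- ===== SOURCE A (Python) =====
-- u= ['','uno','due','tre','quattro','cinque','sei','sette','otto','nove', 'dieci', 'undici','dodici','tredici',
--     'quattordici','quindici','sedici','diciassette','diciotto','diciannove','venti']
--
-- def centinaia(n):
--             n=str(n)
--             cento='cento'
--             c=1
--             if int(n[-3])==0:
--                 return ''
--             while c<10:
--                 if int(n[-2]) == 8:
--                     if int(n[-3]) == 1:
--                         return cento[:-1]
--                     elif int(n[-3]) == c:
--                         return u[c]+cento[:-1]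
--                 else:
--                     if int(n[-3]) == 1:
--                        return cento
--                     elif int(n[-3]) == c:
--                         return u[c]+cento
--
--                 c+=1
-- ===== SOURCE B (Python) =====
-- u= ['','uno','due','tre','quattro','cinque','sei','sette','otto','nove', 'dieci', 'undici','dodici','tredici',
--     'quattordici','quindici','sedici','diciassette','diciotto','diciannove','venti']
--
-- def centinaia(n):
--     s = str(n)
--     d = int(s[-3])
--     t = int(s[-2])
--     if d == 0:
--         return ''
--     suffix = 'cent' if t == 8 else 'cento'
--     return suffix if d == 1 else u[d] + suffix
-- ===== Notes on version B (the rewrite author's own statement) =====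
-- stated objective: simpler
-- what changed: B replaces A's while-loop linear scan over c=1..9 (with per-iteration t==8 branching) by straight-line code: a direct indexed lookup u[d] plus a precomputed suffix ('cent' if t==8 else 'cento').
import Mathlib
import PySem

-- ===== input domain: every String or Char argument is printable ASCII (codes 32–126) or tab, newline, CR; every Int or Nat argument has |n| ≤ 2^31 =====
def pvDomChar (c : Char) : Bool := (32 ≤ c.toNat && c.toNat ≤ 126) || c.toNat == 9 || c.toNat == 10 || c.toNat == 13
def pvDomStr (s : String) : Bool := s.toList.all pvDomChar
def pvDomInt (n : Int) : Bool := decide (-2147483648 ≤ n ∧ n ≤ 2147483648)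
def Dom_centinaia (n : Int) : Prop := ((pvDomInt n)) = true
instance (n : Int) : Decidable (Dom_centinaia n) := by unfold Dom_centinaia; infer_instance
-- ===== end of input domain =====

-- B replaces A's while-loop scan over c = 1..9 with a direct indexed lookup u[d] and a
-- precomputed suffix ('cent' before 'otto...', else 'cento'); objective: simpler.

-- the module-level list u (shared context of A and B)
def pvU : List String := ["", "uno", "due", "tre", "quattro", "cinque", "sei", "sette", "otto",
  "nove", "dieci", "undici", "dodici", "tredici", "quattordici", "quindici", "sedici",
  "diciassette", "diciotto", "diciannove", "venti"]

-- ===== PORT A =====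
-- A's while-loop 'while c < 10: … c += 1': fuel = remaining iterations (9 from c = 1);
-- fuel 0 = loop exhausted, where Python falls off and returns None (unreachable for a digit d ≠ 0).
def centinaiaLoopA (d t : Int) (cento : String) (c : Int) : Nat → String
  | 0 => ""
  | fuel + 1 =>
    if t = 8 then
      if d = 1 then PySem.Str.slice cento none (some (-1))          -- cento[:-1]
      else if d = c then PySem.List.pyGetD pvU c "" ++ PySem.Str.slice cento none (some (-1))  -- u[c]+cento[:-1]
      else centinaiaLoopA d t cento (c + 1) fuel
    else
      if d = 1 then cento
      else if d = c then PySem.List.pyGetD pvU c "" ++ cento        -- u[c]+cento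
      else centinaiaLoopA d t cento (c + 1) fuel

def centinaia (n : Int) : String :=
  -- n = str(n); int(n[-3]) / int(n[-2]): none = IndexError/ValueError, excluded by Pre_
  match (PySem.Str.pyGet? (PySem.Int.toStr n) (-3)).bind (fun c => PySem.Int.ofChars? [c]) with
  | none => ""
  | some d =>
    if d = 0 then ""
    else
      match (PySem.Str.pyGet? (PySem.Int.toStr n) (-2)).bind (fun c => PySem.Int.ofChars? [c]) with
      | none => ""
      | some t => centinaiaLoopA d t "cento" 1 9

-- ===== PORT B =====
def centinaia_alt (n : Int) : String :=
  -- s = str(n); d = int(s[-3]); t = int(s[-2])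
  match (PySem.Str.pyGet? (PySem.Int.toStr n) (-3)).bind (fun c => PySem.Int.ofChars? [c]),
        (PySem.Str.pyGet? (PySem.Int.toStr n) (-2)).bind (fun c => PySem.Int.ofChars? [c]) with
  | some d, some t =>
    if d = 0 then ""
    else
      let suffix := if t = 8 then "cent" else "cento"
      if d = 1 then suffix
      else PySem.List.pyGetD pvU d "" ++ suffix                     -- u[d] (d is a digit 2..9 here, in range)
  | _, _ => ""

-- ===== PRECONDITION & SPEC =====
-- A raises (IndexError on str(n)[-3], or ValueError on int('-')) exactly when |n| < 100.
def Pre_centinaia (n : Int) : Prop := 100 ≤ n ∨ n ≤ -100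
instance (n : Int) : Decidable (Pre_centinaia n) := by unfold Pre_centinaia; infer_instance
def pvWitness_centinaia : Int := 283

def Spec_centinaia (n : Int) (out : String) : Prop := out = centinaia_alt n
instance (n : Int) (out : String) : Decidable (Spec_centinaia n out) := by unfold Spec_centinaia; infer_instance

-- ===== CLAIM (what is proved, stated in full; the proofs are below) =====
def Claim_equal_centinaia : Prop := ∀ (n : Int), Dom_centinaia n → Pre_centinaia n → Spec_centinaia n (centinaia n)

-- ===== LEMMAS AND PROOFS =====

def pvDigits : List Char := ['0', '1', '2', '3', '4', '5', '6', '7', '8', '9']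

theorem mem_toDigitsCore_digit : ∀ (f m : Nat) (tl : List Char) (c : Char),
    c ∈ Nat.toDigitsCore 10 f m tl → c ∈ tl ∨ c ∈ pvDigits := by
  intro f
  induction f with
  | zero => intro m tl c h; exact Or.inl h
  | succ f ih =>
    intro m tl c h
    have hd : (m % 10).digitChar ∈ pvDigits := by
      have h10 : m % 10 < 10 := Nat.mod_lt _ (by norm_num)
      interval_cases (m % 10) <;> decide
    simp only [Nat.toDigitsCore] at h
    split at h
    · rcases List.mem_cons.mp h with h | h
      · exact Or.inr (h ▸ hd)
      · exact Or.inl h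
    · rcases ih _ _ _ h with h | h
      · rcases List.mem_cons.mp h with h | h
        · exact Or.inr (h ▸ hd)
        · exact Or.inl h
      · exact Or.inr h

theorem mem_toChars (n : Int) (c : Char) (h : c ∈ PySem.Int.toChars n) :
    c = '-' ∨ c ∈ pvDigits := by
  unfold PySem.Int.toChars at h
  split at h
  · rcases List.mem_cons.mp h with h | h
    · exact Or.inl h
    · rcases mem_toDigitsCore_digit _ _ _ _ h with h | h
      · simp at h
      · exact Or.inr h
  · rcases mem_toDigitsCore_digit _ _ _ _ h with h | h
    · simp at h
    · exact Or.inr h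

-- a single digit character parses to a value 0..9 (closed check over the ten digits)
theorem digits_parse_aux :
    (pvDigits.all (fun c =>
      ((PySem.Int.ofChars? [c]).map (fun k => decide (0 ≤ k ∧ k ≤ 9))).getD false)) = true := by
  decide

-- a single character of str(n) that int() accepts is a digit, with value 0..9
theorem parse_char_digit (n : Int) (c : Char) (d : Int)
    (hc : c ∈ PySem.Int.toChars n) (hp : PySem.Int.ofChars? [c] = some d) :
    0 ≤ d ∧ d ≤ 9 := by
  rcases mem_toChars n c hc with h | h
  · subst h
    rw [(by decide : PySem.Int.ofChars? ['-'] = none)] at hp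
    simp at hp
  · have hb := List.all_eq_true.mp digits_parse_aux c h
    rw [hp] at hb
    simpa using hb

-- A's scan c = 1..9 equals B's direct lookup, for any digit d ≠ 0
theorem loopA_closed (d t : Int) (h0 : 0 ≤ d) (h9 : d ≤ 9) (hne : d ≠ 0) :
    centinaiaLoopA d t "cento" 1 9 =
      (if d = 1 then (if t = 8 then "cent" else "cento")
       else PySem.List.pyGetD pvU d "" ++ (if t = 8 then "cent" else "cento")) := by
  interval_cases d <;> by_cases ht : t = 8 <;>
    simp [centinaiaLoopA, ht] <;> first | omega | decide

theorem centinaia_eq_alt (n : Int) : centinaia n = centinaia_alt n := by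
  unfold centinaia centinaia_alt
  cases h3 : (PySem.Str.pyGet? (PySem.Int.toStr n) (-3)).bind (fun c => PySem.Int.ofChars? [c]) with
  | none =>
    cases h2 : (PySem.Str.pyGet? (PySem.Int.toStr n) (-2)).bind (fun c => PySem.Int.ofChars? [c]) <;> rfl
  | some d =>
    rcases Option.bind_eq_some_iff.mp h3 with ⟨c3, hg3, hp3⟩
    have hc3 : c3 ∈ PySem.Int.toChars n := by
      have hg3' : PySem.List.pyGet? (PySem.Int.toChars n) (-3) = some c3 := by
        rw [← PySem.Int.toList_toStr, ← PySem.Chars.pyGet?_eq_listPyGet?, ← PySem.Str.pyGet?_eq]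
        exact hg3
      exact PySem.List.mem_of_pyGet?_eq_some _ hg3'
    obtain ⟨hd0, hd9⟩ := parse_char_digit n c3 d hc3 hp3
    cases h2 : (PySem.Str.pyGet? (PySem.Int.toStr n) (-2)).bind (fun c => PySem.Int.ofChars? [c]) with
    | none => by_cases hd : d = 0 <;> simp [hd]
    | some t =>
      by_cases hd : d = 0
      · simp [hd]
      · simp only [if_neg hd]
        rw [loopA_closed d t hd0 hd9 hd]

-- ===== VERDICT (by name: the statement is the Claim_ definition above) =====
theorem centinaia_spec : Claim_equal_centinaia := by
  intro n _ _
  exact centinaia_eq_alt n
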